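-- pv_equiv track=rewrite | github.com/alejandroacevedo2305/Flux_v0 | releases/simv7.py | rank_by_magnitude
-- ===== SOURCE A (Python) =====
-- def rank_by_magnitude(arr):
--     sorted_indices = sorted(enumerate(arr), key=lambda x: x[1], reverse=True)
--     rank_arr = [0] * len(arr)
--     rank = 1  # Initialize rank
--     for i in range(len(sorted_indices)):
--         index, value = sorted_indices[i]
--         if i > 0 and value == sorted_indices[i - 1][1]:
--             pass  # Don't increment the rank
--         else:
--             rank = i + 1  # Set new rank
--         rank_arr[index] = rank  # Store the rank at the original position
--     return rank_arr
-- ===== SOURCE B (Python) =====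
-- def rank_by_magnitude(arr):
--     # Competition rank = 1 + number of strictly larger values; no sort, no tie tracking.
--     return [1 + sum(1 for w in arr if w > v) for v in arr]
-- ===== Notes on version B (the rewrite author's own statement) =====
-- stated objective: simpler
-- what changed: Replaced the sort plus stateful tie-tracking loop and positional writes by the closed form: each element's competition rank is 1 + the count of strictly larger values, computed in one comprehension.
import Mathlib
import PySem

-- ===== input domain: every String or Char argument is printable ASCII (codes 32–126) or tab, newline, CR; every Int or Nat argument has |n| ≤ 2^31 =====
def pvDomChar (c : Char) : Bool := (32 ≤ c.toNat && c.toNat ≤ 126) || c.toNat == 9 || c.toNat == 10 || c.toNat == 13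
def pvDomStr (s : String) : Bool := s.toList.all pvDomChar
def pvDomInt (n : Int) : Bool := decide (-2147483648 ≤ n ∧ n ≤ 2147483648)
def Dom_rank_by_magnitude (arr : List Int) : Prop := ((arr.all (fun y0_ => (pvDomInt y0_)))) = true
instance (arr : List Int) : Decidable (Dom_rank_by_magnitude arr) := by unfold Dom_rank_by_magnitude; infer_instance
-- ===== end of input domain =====

-- B replaces A's sort + stateful tie-tracking loop by the closed form
-- rank v = 1 + #(strictly larger values); objective: simpler.

-- ===== PORT A =====
-- loop body of A's `for i in range(len(sorted_indices))`; state = (rank_arr, rank)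
def rank_step (sorted_indices : List (Int × Int)) (st : List Int × Int) (i : Int) :
    List Int × Int :=
  let p := PySem.List.pyGetD sorted_indices i (0, 0)          -- index, value = sorted_indices[i]
  let rank :=
    if 0 < i ∧ p.2 = (PySem.List.pyGetD sorted_indices (i - 1) (0, 0)).2 then st.2
    else i + 1
  (PySem.List.pySetD st.1 p.1 rank, rank)                     -- rank_arr[index] = rank

def rank_by_magnitude (arr : List Int) : List Int :=
  let sorted_indices :=
    PySem.List.sorted (PySem.List.enumerate arr) (fun x => x.2) true
  ((PySem.List.pyRange 0 (PySem.List.len sorted_indices) 1).foldl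
      (rank_step sorted_indices) (List.replicate arr.length 0, 1)).1

-- ===== PORT B =====
def rank_by_magnitude_alt (arr : List Int) : List Int :=
  arr.map (fun v => 1 + arr.foldl (fun acc w => if v < w then acc + 1 else acc) (0 : Int))

-- ===== PRECONDITION & SPEC =====
def Spec_rank_by_magnitude (arr : List Int) (out : List Int) : Prop := out = rank_by_magnitude_alt arr
instance (arr : List Int) (out : List Int) : Decidable (Spec_rank_by_magnitude arr out) := by unfold Spec_rank_by_magnitude; infer_instance

-- ===== CLAIM (what is proved, stated in full; the proofs are below) =====
def Claim_equal_rank_by_magnitude : Prop := ∀ (arr : List Int), Dom_rank_by_magnitude arr → Spec_rank_by_magnitude arr (rank_by_magnitude arr)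

-- ===== LEMMAS AND PROOFS =====

-- competition rank of value v in s (pairs (orig. index, value)): 1 + #strictly larger
def crank (s : List (Int × Int)) (v : Int) : Int :=
  1 + (s.countP (fun p => decide (v < p.2)) : Int)

-- descending order, index-wise
lemma snd_anti (s : List (Int × Int)) (hp : s.Pairwise (fun a b => b.2 ≤ a.2))
    {i j : Nat} (hij : i ≤ j) (hj : j < s.length) : (s[j]'hj).2 ≤ (s[i]'(lt_of_le_of_lt hij hj)).2 := by
  rcases eq_or_lt_of_le hij with rfl | h
  · exact le_refl _
  · exact List.pairwise_iff_getElem.mp hp i j _ hj h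

-- at a block start (value strictly below the previous one, or position 0),
-- the count of strictly larger values is exactly the position
lemma countP_eq_pos (s : List (Int × Int)) (m : Nat) (hm : m ≤ s.length) (v : Int)
    (hbefore : ∀ j (hj : j < m), v < (s[j]'(lt_of_lt_of_le hj hm)).2)
    (hafter : ∀ k (hk : k < s.length), m ≤ k → (s[k]'hk).2 ≤ v) :
    s.countP (fun p => decide (v < p.2)) = m := by
  conv_lhs => rw [(List.take_append_drop m s).symm]
  rw [List.countP_append]
  have h1 : (s.take m).countP (fun p => decide (v < p.2)) = m := by
    rw [List.countP_eq_length.mpr, List.length_take_of_le hm]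
    intro a ha
    obtain ⟨k, hk, rfl⟩ := List.mem_iff_getElem.mp ha
    have hk' : k < m := by
      have := hk; rw [List.length_take] at this; omega
    rw [List.getElem_take]
    simpa using hbefore k hk'
  have h2 : (s.drop m).countP (fun p => decide (v < p.2)) = 0 := by
    rw [List.countP_eq_zero]
    intro a ha
    obtain ⟨k, hk, rfl⟩ := List.mem_iff_getElem.mp ha
    rw [List.getElem_drop]
    have hle := hafter (m + k) (by rw [List.length_drop] at hk; omega) (Nat.le_add_right m k)
    simp only [decide_eq_true_eq]
    omega
  omega

-- the loop invariant of A's fold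
lemma loop_inv (s : List (Int × Int)) (hp : s.Pairwise (fun a b => b.2 ≤ a.2))
    (n : Nat) (hn : s.length = n)
    (hfst : ∀ q ∈ s, 0 ≤ q.1 ∧ q.1 < (n : Int))
    (hnd : (s.map Prod.fst).Nodup)
    (m : Nat) (hm : m ≤ n) :
    (((PySem.List.pyRange 0 (m : Int) 1).foldl (rank_step s)
        (List.replicate n 0, 1)).1.length = n)
    ∧ (∀ i, i < m →
        ((PySem.List.pyRange 0 (m : Int) 1).foldl (rank_step s)
          (List.replicate n 0, 1)).1.getD (s.getD i (0,0)).1.toNat 0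
          = crank s (s.getD i (0,0)).2)
    ∧ (0 < m →
        ((PySem.List.pyRange 0 (m : Int) 1).foldl (rank_step s)
          (List.replicate n 0, 1)).2 = crank s (s.getD (m-1) (0,0)).2) := by
  induction m with
  | zero =>
    rw [show ((0:Nat):Int) = 0 from rfl, PySem.List.pyRange_one_eq_nil (le_refl 0)]
    exact ⟨by simp [List.foldl_nil], fun i hi => absurd hi (Nat.not_lt_zero i),
      fun h => absurd h (lt_irrefl 0)⟩
  | succ m ih =>
    have hm' : m ≤ n := Nat.le_of_succ_le hm
    have hmlt : m < s.length := by omega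
    obtain ⟨ihlen, ihval, ihrank⟩ := ih hm'
    rw [show ((m+1 : Nat) : Int) = (m:Int) + 1 by push_cast; ring,
        PySem.List.pyRange_one_succ_right (by positivity), List.foldl_append]
    set st := (PySem.List.pyRange 0 (m : Int) 1).foldl (rank_step s)
      (List.replicate n 0, 1) with hst
    rw [List.foldl_cons, List.foldl_nil]
    have hget : PySem.List.pyGetD s ((m:Int)) (0,0) = s[m]'hmlt :=
      PySem.List.pyGetD_ofNat s m (0,0) hmlt
    have key : (if 0 < (m:Int) ∧ (s[m]'hmlt).2 = (PySem.List.pyGetD s ((m:Int) - 1) (0,0)).2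
        then st.2 else (m:Int) + 1) = crank s (s[m]'hmlt).2 := by
      rcases Nat.eq_zero_or_pos m with rfl | hmpos
      · rw [if_neg (by simp)]
        have h0 : s.countP (fun p => decide ((s[0]'hmlt).2 < p.2)) = 0 :=
          countP_eq_pos s 0 (Nat.zero_le _) _ (fun j hj => absurd hj (Nat.not_lt_zero j))
            (fun k hk _ => snd_anti s hp (Nat.zero_le k) hk)
        simp [crank, h0]
      · have hprev : ((m:Int) - 1) = ((m-1 : Nat) : Int) := by omega
        have hprevlt : m - 1 < s.length := by omega
        rw [hprev, PySem.List.pyGetD_ofNat s (m-1) (0,0) hprevlt]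
        by_cases heq : (s[m]'hmlt).2 = (s[m-1]'hprevlt).2
        · rw [if_pos ⟨by exact_mod_cast hmpos, heq⟩, ihrank hmpos,
              List.getD_eq_getElem s (0,0) hprevlt, heq]
        · rw [if_neg (by tauto)]
          have hlt : (s[m]'hmlt).2 < (s[m-1]'hprevlt).2 :=
            lt_of_le_of_ne (snd_anti s hp (by omega) hmlt) heq
          have hc : s.countP (fun p => decide ((s[m]'hmlt).2 < p.2)) = m := by
            refine countP_eq_pos s m (le_of_lt hmlt) _ (fun j hj => ?_)
              (fun k hk hmk => snd_anti s hp hmk hk)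
            exact lt_of_lt_of_le hlt (snd_anti s hp (by omega) hprevlt)
          rw [crank, hc]; ring
    simp only [rank_step, hget]
    have hmem : s[m]'hmlt ∈ s := List.getElem_mem hmlt
    obtain ⟨hidx0, hidxn⟩ := hfst _ hmem
    have hsetd : PySem.List.pySetD st.1 (s[m]'hmlt).1
        (if 0 < (m:Int) ∧ (s[m]'hmlt).2 = (PySem.List.pyGetD s ((m:Int) - 1) (0,0)).2
          then st.2 else (m:Int) + 1)
        = st.1.set (s[m]'hmlt).1.toNat (crank s (s[m]'hmlt).2) := by
      rw [key, PySem.List.pySetD_of_nonneg st.1 _ hidx0]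
    refine ⟨?_, ?_, ?_⟩
    · simpa [hsetd] using ihlen
    · intro i hi
      have hilt : i < s.length := by omega
      rw [hsetd, List.getD_eq_getElem s (0,0) hilt]
      have hidxlt : (s[m]'hmlt).1.toNat < st.1.length := by
        rw [ihlen]; omega
      rcases Nat.lt_succ_iff_lt_or_eq.mp hi with hi' | rfl
      · have hne : (s[i]'hilt).1 ≠ (s[m]'hmlt).1 := by
          intro hcontra
          have : i = m := by
            have hmap : (s.map Prod.fst)[i]'(by simpa using hilt)
                = (s.map Prod.fst)[m]'(by simpa using hmlt) := by
              simpa using hcontra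
            exact (List.Nodup.getElem_inj_iff hnd).mp hmap
          omega
        have hne' : (s[m]'hmlt).1.toNat ≠ (s[i]'hilt).1.toNat := by
          obtain ⟨hi0, _⟩ := hfst _ (List.getElem_mem hilt)
          omega
        have hvlt : (s[i]'hilt).1.toNat < (st.1.set (s[m]'hmlt).1.toNat
            (crank s (s[m]'hmlt).2)).length := by
          rw [List.length_set, ihlen]
          obtain ⟨_, h2⟩ := hfst _ (List.getElem_mem hilt); omega
        rw [List.getD_eq_getElem _ 0 hvlt, List.getElem_set_ne hne' hvlt,
            ← List.getD_eq_getElem st.1 0]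
        have := ihval i hi'
        rwa [List.getD_eq_getElem s (0,0) hilt] at this
      · have hvlt : (s[i]'hilt).1.toNat < (st.1.set (s[i]'hilt).1.toNat
            (crank s (s[i]'hilt).2)).length := by
          rw [List.length_set, ihlen]; omega
        rw [List.getD_eq_getElem _ 0 hvlt, List.getElem_set_self hvlt]
    · intro _
      rw [key, Nat.add_sub_cancel, List.getD_eq_getElem s (0,0) hmlt]

theorem rank_by_magnitude_spec_aux (arr : List Int) :
    rank_by_magnitude arr = rank_by_magnitude_alt arr := by
  have hperm : (PySem.List.sorted (PySem.List.enumerate arr) (fun x => x.2) true).Perm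
      (PySem.List.enumerate arr) := PySem.List.sorted_perm _ _ true
  set s := PySem.List.sorted (PySem.List.enumerate arr) (fun x => x.2) true with hs
  set n := arr.length with hn
  have hslen : s.length = n := by
    rw [hs, PySem.List.length_sorted, PySem.List.length_enumerate]
  have hp : s.Pairwise (fun a b => b.2 ≤ a.2) := PySem.List.sorted_pairwise_rev _ _
  have hfst : ∀ q ∈ s, 0 ≤ q.1 ∧ q.1 < (n:Int) := by
    intro q hq
    obtain ⟨k, hk, rfl⟩ := (PySem.List.mem_enumerate_iff arr 0 q).mp (hperm.subset hq)
    refine ⟨by simp, ?_⟩; simp; omega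
  have hmapperm : (s.map Prod.fst).Perm (PySem.List.pyRange 0 (n:Int)) := by
    have h1 := hperm.map Prod.fst
    have h2 : (PySem.List.enumerate arr).map Prod.fst = PySem.List.pyRange 0 (n:Int) := by
      have := PySem.List.map_fst_enumerate arr 0
      simpa using this
    rwa [h2] at h1
  have hnd : (s.map Prod.fst).Nodup :=
    hmapperm.nodup_iff.mpr (PySem.List.nodup_pyRange_one 0 (n:Int))
  obtain ⟨hAlen, hAval, -⟩ :=
    loop_inv s hp n hslen hfst hnd n (le_refl n)
  show (((PySem.List.pyRange 0 (PySem.List.len s) 1).foldl (rank_step s)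
      (List.replicate arr.length 0, 1)).1) = _
  rw [PySem.List.len_eq, hslen]
  set A := ((PySem.List.pyRange 0 ((n:Nat):Int) 1).foldl (rank_step s)
      (List.replicate n 0, 1)).1 with hA
  apply List.ext_getElem
  · rw [hAlen]; simp [rank_by_magnitude_alt]; exact hn
  intro j hj1 hj2
  have hjn : j < n := by rwa [hAlen] at hj1
  have hjarr : j < arr.length := hjn
  simp only [rank_by_magnitude_alt, List.getElem_map]
  have hjmem : ((j:Int)) ∈ s.map Prod.fst :=
    hmapperm.mem_iff.mpr (PySem.List.mem_pyRange_one.mpr ⟨by positivity, by exact_mod_cast hjn⟩)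
  obtain ⟨q, hq, hq1⟩ := List.mem_map.mp hjmem
  obtain ⟨i, hilt, rfl⟩ := List.mem_iff_getElem.mp hq
  have hival := hAval i (by omega)
  rw [List.getD_eq_getElem s (0,0) hilt] at hival
  have htn : (s[i]'hilt).1.toNat = j := by rw [hq1]; simp
  obtain ⟨k, hk, hkeq⟩ := (PySem.List.mem_enumerate_iff arr 0 _).mp
    (hperm.subset (List.getElem_mem hilt))
  have hkj : k = j := by
    have : (s[i]'hilt).1 = (j:Int) := hq1
    rw [hkeq] at this; simp at this; omega
  have hval : (s[i]'hilt).2 = arr[j]'hjarr := by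
    subst hkj; rw [hkeq]
  rw [htn, hval] at hival
  rw [List.getD_eq_getElem A 0 hj1] at hival
  rw [hival]
  have hcount : ∀ v : Int, s.countP (fun p => decide (v < p.2))
      = arr.countP (fun w => decide (v < w)) := by
    intro v
    rw [hperm.countP_eq]
    conv_rhs => rw [show arr = (PySem.List.enumerate arr).map (fun x => x.2) from
      (PySem.List.map_snd_enumerate arr 0).symm]
    rw [List.countP_map]
    rfl
  have hfold : arr.foldl (fun acc w => if (arr[j]'hjarr) < w then acc + 1 else acc) (0:Int)
      = ((arr.countP (fun w => decide ((arr[j]'hjarr) < w)) : Nat) : Int) := by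
    rw [show (fun (acc:Int) w => if (arr[j]'hjarr) < w then acc + 1 else acc)
        = (fun (acc:Int) w => if (fun w => decide ((arr[j]'hjarr) < w)) w = true
            then acc + 1 else acc) by funext acc w; simp]
    simpa using PySem.List.foldl_count_if (fun w => decide ((arr[j]'hjarr) < w)) arr 0
  rw [crank, hcount (arr[j]'hjarr), hfold]

-- ===== VERDICT (by name: the statement is the Claim_ definition above) =====
theorem rank_by_magnitude_spec : Claim_equal_rank_by_magnitude := by
  intro arr _
  unfold Spec_rank_by_magnitude
  exact rank_by_magnitude_spec_aux arr
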